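-- pv_equiv track=rewrite | github.com/ali-qasimi/codility-problems | practise-2023/18-number-of-disk-intersections.py | solution_a
-- ===== SOURCE A (Python) =====
-- def solution_a(A):
--     # Correctness = 100%, Performance = 0%, Time Complexity = O(N^2)
--
--     counter = 0
--     iterate_right = True
--     iterate_left = True
--
--     for i in range(len(A)-1):
--         j = i+1
--         while iterate_right:
--
--             distance_right = j - i
--             sum_radius_right = A[i] + A[j]
--
--             if distance_right <= sum_radius_right:
--                 counter += 1
--
--                 if j+1 <= len(A)-1:
--                     j += 1
--                 else:
--                     break
--             else:
--                 if j+1 <= len(A)-1: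
--                     j += 1
--                 else:
--                     break
--
--     return counter
-- ===== SOURCE B (Python) =====
-- def solution_a(A):
--     # Sweep j left to right keeping the values i + A[i] (i < j) in a sorted
--     # list; a pair (i, j), i < j, intersects iff i + A[i] >= j - A[j], so the
--     # count for each j is one binary search in the sorted prefix.
--     def _lb(lst, v):
--         # index of the first element >= v (lower bound) in sorted lst
--         lo, hi = 0, len(lst)
--         while lo < hi:
--             mid = (lo + hi) // 2
--             if lst[mid] < v:
--                 lo = mid + 1
--             else:
--                 hi = mid
--         return lo
--
--     counter = 0
--     prefix = []
--     for j in range(len(A)):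
--         counter += len(prefix) - _lb(prefix, j - A[j])
--         prefix.insert(_lb(prefix, j + A[j]), j + A[j])
--     return counter
-- ===== Notes on version B (the rewrite author's own statement) =====
-- stated objective: faster
-- what changed: Replaced the quadratic double loop testing every pair i<j against j-i <= A[i]+A[j] with a left-to-right sweep that keeps the values i+A[i] in a sorted list and counts, per j, the elements >= j-A[j] by a hand-written binary search.
import Mathlib
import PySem

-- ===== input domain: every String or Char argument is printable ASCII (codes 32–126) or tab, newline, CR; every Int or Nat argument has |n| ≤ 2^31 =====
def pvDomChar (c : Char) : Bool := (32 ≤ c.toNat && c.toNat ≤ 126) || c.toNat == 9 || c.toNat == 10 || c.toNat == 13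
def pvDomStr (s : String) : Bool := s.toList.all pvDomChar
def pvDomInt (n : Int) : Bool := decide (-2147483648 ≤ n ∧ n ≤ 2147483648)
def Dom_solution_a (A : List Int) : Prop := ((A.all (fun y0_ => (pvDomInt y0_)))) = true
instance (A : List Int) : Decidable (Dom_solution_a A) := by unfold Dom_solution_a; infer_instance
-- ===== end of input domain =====

-- ===== PORT A =====
-- B replaces A's O(n^2) pair scan by a sorted-prefix sweep with binary search (objective: faster).

-- inner `while` of A: j walks right from i+1 to len(A)-1, counting intersecting pairs
def innerA (A : List Int) (i j counter : Int) : Int :=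
  let counter' := if j - i ≤ PySem.List.pyGetD A i 0 + PySem.List.pyGetD A j 0 then counter + 1 else counter
  if j + 1 ≤ (A.length : Int) - 1 then innerA A i (j + 1) counter' else counter'
termination_by ((A.length : Int) - 1 - j).toNat
decreasing_by omega

def solution_a (A : List Int) : Int :=
  (PySem.List.pyRange 0 ((A.length : Int) - 1) 1).foldl (fun counter i => innerA A i (i + 1) counter) 0

-- ===== PORT B =====
-- B's helper _lb: lower-bound binary search (first index whose element is ≥ v) in a sorted list
def lbB (lst : List Int) (v lo hi : Int) : Int :=
  if lo < hi then
    let mid := PySem.Int.floordiv (lo + hi) 2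
    if PySem.List.pyGetD lst mid 0 < v then lbB lst v (mid + 1) hi
    else lbB lst v lo mid
  else lo
termination_by (hi - lo).toNat
decreasing_by
  · have h1 := (PySem.Int.floordiv_two_mid_bounds (le_of_lt (by assumption : lo < hi))).1
    have h2 := (PySem.Int.floordiv_lt_iff_lt_mul (a := lo + hi) (b := 2) (q := hi) (by norm_num)).mpr (by omega)
    omega
  · have h2 := (PySem.Int.floordiv_lt_iff_lt_mul (a := lo + hi) (b := 2) (q := hi) (by norm_num)).mpr (by omega)
    omega

def solution_a_alt (A : List Int) : Int :=
  ((PySem.List.pyRange 0 (A.length : Int) 1).foldl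
    (fun (st : Int × List Int) j =>
      let counter := st.1
      let pre := st.2
      let counter' := counter + ((pre.length : Int) - lbB pre (j - PySem.List.pyGetD A j 0) 0 (pre.length : Int))
      let x := j + PySem.List.pyGetD A j 0
      (counter', PySem.List.insert pre (lbB pre x 0 (pre.length : Int)) x))
    (0, [])).1

-- ===== PRECONDITION & SPEC =====
def Spec_solution_a (A : List Int) (out : Int) : Prop := out = solution_a_alt A
instance (A : List Int) (out : Int) : Decidable (Spec_solution_a A out) := by unfold Spec_solution_a; infer_instance

-- ===== CLAIM (what is proved, stated in full; the proofs are below) =====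
def Claim_equal_solution_a : Prop := ∀ (A : List Int), Dom_solution_a A → Spec_solution_a A (solution_a A)

-- ===== LEMMAS AND PROOFS =====

-- the intersection condition, over Nat indices, in B's normalised form
def pvQ (A : List Int) (i j : Nat) : Bool :=
  decide ((j : Int) - A.getD j 0 ≤ (i : Int) + A.getD i 0)

def pvG (A : List Int) (i j : Nat) : Int := if i < j ∧ pvQ A i j then 1 else 0

lemma list_range_sum (n : Nat) (f : Nat → Int) :
    ((List.range n).map f).sum = ∑ k ∈ Finset.range n, f k := by
  induction n with
  | zero => simp
  | succ m ih => simp [List.range_succ, Finset.sum_range_succ, ih]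

lemma countP_range_sum (m : Nat) (q : Nat → Bool) :
    ((List.range m).countP q : Int) = ∑ k ∈ Finset.range m, (if q k then (1 : Int) else 0) := by
  induction m with
  | zero => simp
  | succ m ih =>
      rw [List.range_succ, List.countP_append, Finset.sum_range_succ, ← ih]
      split_ifs with h <;> simp [h]

lemma countP_pyRange_sum (a b : Nat) (p : Int → Bool) :
    ((PySem.List.pyRange (a : Int) (b : Int) 1).countP p : Int)
      = ∑ j ∈ Finset.Ico a b, (if p (j : Int) then (1 : Int) else 0) := by
  rw [PySem.List.pyRange_one, List.countP_map]
  have h1 : ((b : Int) - (a : Int)).toNat = b - a := by omega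
  rw [h1, countP_range_sum, Finset.sum_Ico_eq_sum_range]
  refine Finset.sum_congr rfl (fun k _ => ?_)
  have : ((a + k : Nat) : Int) = (a : Int) + (k : Nat) := by push_cast; ring
  simp [Function.comp, this]

lemma innerA_char (A : List Int) (i : Int) :
    ∀ (m : Nat) (j c : Int), (((A.length : Int) - 1 - j).toNat ≤ m) → j ≤ (A.length : Int) - 1 →
      innerA A i j c = c + ((PySem.List.pyRange j (A.length : Int) 1).countP
        (fun k => decide (k - i ≤ PySem.List.pyGetD A i 0 + PySem.List.pyGetD A k 0)) : Int) := by
  intro m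
  induction m with
  | zero =>
      intro j c hm hj
      have hjeq : j = (A.length : Int) - 1 := by omega
      rw [innerA, if_neg (by omega)]
      rw [PySem.List.pyRange_one_cons (by omega), PySem.List.pyRange_one_eq_nil (by omega)]
      simp only [List.countP_cons, List.countP_nil, decide_eq_true_eq]
      split_ifs <;> push_cast <;> ring
  | succ m ih =>
      intro j c hm hj
      by_cases hg : j + 1 ≤ (A.length : Int) - 1
      · rw [innerA, if_pos hg]
        rw [ih (j + 1) _ (by omega) (by omega)]
        rw [PySem.List.pyRange_one_cons (a := j) (b := (A.length : Int)) (by omega)]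
        simp only [List.countP_cons, decide_eq_true_eq]
        split_ifs <;> push_cast <;> ring
      · rw [innerA, if_neg hg]
        rw [PySem.List.pyRange_one_cons (by omega), PySem.List.pyRange_one_eq_nil (by omega)]
        simp only [List.countP_cons, List.countP_nil, decide_eq_true_eq]
        split_ifs <;> push_cast <;> ring

lemma solution_a_char (A : List Int) :
    solution_a A = ∑ i ∈ Finset.range A.length, ∑ j ∈ Finset.range A.length, pvG A i j := by
  unfold solution_a
  rw [PySem.List.foldl_congr_mem _ _
    (fun c i => c + ((PySem.List.pyRange (i + 1) (A.length : Int) 1).countP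
      (fun k => decide (k - i ≤ PySem.List.pyGetD A i 0 + PySem.List.pyGetD A k 0)) : Int)) 0
    (by
      intro c i hi
      have hmem := (PySem.List.mem_pyRange_one).mp hi
      exact innerA_char A i (((A.length : Int) - 1 - (i + 1)).toNat) (i + 1) c le_rfl (by omega))]
  rw [PySem.List.foldl_add]
  rcases Nat.eq_zero_or_pos A.length with h0 | hpos
  · simp [h0]
  · have hc : ((A.length : Int) - 1) = ((A.length - 1 : Nat) : Int) := by omega
    rw [hc, PySem.List.pyRange_one, List.map_map]
    have hc2 : (((A.length - 1 : Nat) : Int) - 0).toNat = A.length - 1 := by omega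
    rw [hc2, list_range_sum]
    simp only [Function.comp_apply, zero_add]
    have step1 : ∀ k ∈ Finset.range (A.length - 1),
        ((PySem.List.pyRange ((k : Int) + 1) (A.length : Int) 1).countP
            (fun kk => decide (kk - (k : Int) ≤ PySem.List.pyGetD A (k : Int) 0 + PySem.List.pyGetD A kk 0)) : Int)
          = ∑ j ∈ Finset.range A.length, pvG A k j := by
      intro k hk
      have hcast : (k : Int) + 1 = ((k + 1 : Nat) : Int) := by push_cast; ring
      rw [hcast, countP_pyRange_sum]
      have hsub : Finset.Ico (k + 1) A.length ⊆ Finset.range A.length := by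
        intro j hj; rw [Finset.mem_Ico] at hj; rw [Finset.mem_range]; omega
      have congr1 : ∀ j ∈ Finset.Ico (k + 1) A.length,
          (if (fun kk => decide (kk - (k : Int) ≤ PySem.List.pyGetD A (k : Int) 0 + PySem.List.pyGetD A kk 0)) (j : Int) then (1 : Int) else 0)
            = pvG A k j := by
        intro j hj
        rw [Finset.mem_Ico] at hj
        simp only [PySem.List.pyGetD_natCast, pvG, pvQ, decide_eq_true_eq]
        split_ifs <;> omega
      rw [Finset.sum_congr rfl congr1]
      refine Finset.sum_subset hsub (fun j hjr hjn => ?_)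
      rw [Finset.mem_range] at hjr
      rw [Finset.mem_Ico] at hjn
      have hnk : ¬ k < j := by omega
      simp [pvG, hnk]
    rw [Finset.sum_congr rfl step1]
    refine Finset.sum_subset (fun x hx => ?_) ?_
    · rw [Finset.mem_range] at hx ⊢; omega
    intro i hi hni
    rw [Finset.mem_range] at hi
    rw [Finset.mem_range] at hni
    refine Finset.sum_eq_zero (fun j hj => ?_)
    rw [Finset.mem_range] at hj
    have hnk : ¬ i < j := by omega
    simp [pvG, hnk]

-- in a sorted list, the elements < y form exactly the prefix of length countP (· < y)
lemma sorted_lt_prefix (l : List Int) (y : Int) (hs : l.Pairwise (· ≤ ·)) :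
    ∀ (k : Nat) (hk : k < l.length), (l[k] < y ↔ k < l.countP (fun v => decide (v < y))) := by
  induction l with
  | nil => intro k hk; simp at hk
  | cons x t ih =>
      rw [List.pairwise_cons] at hs
      intro k hk
      rw [List.countP_cons]
      by_cases hx : x < y
      · cases k with
        | zero => simp [hx]
        | succ k =>
            have := ih hs.2 k (by simpa using hk)
            simp only [List.getElem_cons_succ, hx]
            simpa using this
      · have ht0 : t.countP (fun v => decide (v < y)) = 0 := by
          rw [List.countP_eq_zero]
          intro v hv
          simp only [decide_eq_true_eq]
          exact fun h => hx (lt_of_le_of_lt (hs.1 v hv) h)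
        cases k with
        | zero => simp [hx, ht0]
        | succ k =>
            have hk' : k < t.length := by simpa using hk
            have hm : t[k] ∈ t := List.getElem_mem hk'
            simp only [List.getElem_cons_succ, ht0]
            constructor
            · intro h; exact absurd h (fun h => hx (lt_of_le_of_lt (hs.1 _ hm) h))
            · intro h; simp [hx] at h

lemma lbB_eq_countP (l : List Int) (y : Int) (hs : l.Pairwise (· ≤ ·)) :
    ∀ (m : Nat) (lo hi : Int), ((hi - lo).toNat ≤ m) → 0 ≤ lo → hi ≤ (l.length : Int) →
      lo ≤ (l.countP (fun v => decide (v < y)) : Int) → (l.countP (fun v => decide (v < y)) : Int) ≤ hi →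
      lbB l y lo hi = (l.countP (fun v => decide (v < y)) : Int) := by
  intro m
  induction m with
  | zero =>
      intro lo hi hm h0 hh hlo hhi
      rw [lbB, if_neg (by omega)]
      omega
  | succ m ih =>
      intro lo hi hm h0 hh hlo hhi
      by_cases hlh : lo < hi
      · rw [lbB, if_pos hlh]
        show (if PySem.List.pyGetD l (PySem.Int.floordiv (lo + hi) 2) 0 < y
            then lbB l y (PySem.Int.floordiv (lo + hi) 2 + 1) hi
            else lbB l y lo (PySem.Int.floordiv (lo + hi) 2)) = _
        have hb1 := PySem.Int.floordiv_two_mid_bounds (le_of_lt hlh)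
        have hb2 := (PySem.Int.floordiv_lt_iff_lt_mul (a := lo + hi) (b := 2) (q := hi) (by norm_num)).mpr (by omega)
        set mid := PySem.Int.floordiv (lo + hi) 2 with hmid
        have hmlen : mid < (l.length : Int) := by omega
        have hmt : mid.toNat < l.length := by omega
        rw [PySem.List.pyGetD_eq_getElem l 0 (by omega) (by omega)]
        have hiff := sorted_lt_prefix l y hs mid.toNat hmt
        by_cases hlt : l[mid.toNat] < y
        · rw [if_pos hlt]
          have : mid.toNat < l.countP (fun v => decide (v < y)) := hiff.mp hlt
          exact ih (mid + 1) hi (by omega) (by omega) hh (by omega) hhi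
        · rw [if_neg hlt]
          have : ¬ mid.toNat < l.countP (fun v => decide (v < y)) := fun h => hlt (hiff.mpr h)
          exact ih lo mid (by omega) h0 (by omega) hlo (by omega)
      · rw [lbB, if_neg hlh]
        omega

lemma lbB_full (l : List Int) (y : Int) (hs : l.Pairwise (· ≤ ·)) :
    lbB l y 0 (l.length : Int) = (l.countP (fun v => decide (v < y)) : Int) := by
  refine lbB_eq_countP l y hs (l.length) 0 (l.length : Int) (by omega) le_rfl le_rfl ?_ ?_ <;>
    have := List.countP_le_length (l := l) (p := fun v => decide (v < y)) <;> omega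

lemma sorted_insert_at_countP (l : List Int) (x : Int) (hs : l.Pairwise (· ≤ ·)) :
    (List.take (l.countP (fun v => decide (v < x))) l ++ x :: List.drop (l.countP (fun v => decide (v < x))) l).Pairwise (· ≤ ·) := by
  set c := l.countP (fun v => decide (v < x)) with hc
  have hcle : c ≤ l.length := List.countP_le_length
  have htake : ∀ a ∈ List.take c l, a < x := by
    intro a ha
    obtain ⟨k, hk, rfl⟩ := List.mem_iff_getElem.mp ha
    rw [List.getElem_take]
    have hkc : k < c := by simp at hk; omega
    have hkl : k < l.length := by omega
    exact (sorted_lt_prefix l x hs k hkl).mpr hkc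
  have hdrop : ∀ b ∈ List.drop c l, x ≤ b := by
    intro b hb
    obtain ⟨k, hk, rfl⟩ := List.mem_iff_getElem.mp hb
    rw [List.getElem_drop]
    have hkl : c + k < l.length := by simp at hk; omega
    have : ¬ (c + k < c) := by omega
    exact le_of_not_gt (fun h => this ((sorted_lt_prefix l x hs (c + k) hkl).mp h))
  rw [List.pairwise_append]
  refine ⟨hs.sublist (List.take_sublist c l), ?_, ?_⟩
  · rw [List.pairwise_cons]
    exact ⟨hdrop, hs.sublist (List.drop_sublist c l)⟩
  · intro a ha b hb
    rcases List.mem_cons.mp hb with rfl | hb'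
    · exact le_of_lt (htake a ha)
    · exact le_of_lt (lt_of_lt_of_le (htake a ha) (hdrop b hb'))

lemma alt_inv (A : List Int) (j : Nat) :
    (((PySem.List.pyRange 0 (j : Int) 1).foldl
      (fun (st : Int × List Int) j =>
        let counter := st.1
        let pre := st.2
        let counter' := counter + ((pre.length : Int) - lbB pre (j - PySem.List.pyGetD A j 0) 0 (pre.length : Int))
        let x := j + PySem.List.pyGetD A j 0
        (counter', PySem.List.insert pre (lbB pre x 0 (pre.length : Int)) x))
      ((0 : Int), ([] : List Int))).2.Pairwise (· ≤ ·)) ∧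
    (((PySem.List.pyRange 0 (j : Int) 1).foldl
      (fun (st : Int × List Int) j =>
        let counter := st.1
        let pre := st.2
        let counter' := counter + ((pre.length : Int) - lbB pre (j - PySem.List.pyGetD A j 0) 0 (pre.length : Int))
        let x := j + PySem.List.pyGetD A j 0
        (counter', PySem.List.insert pre (lbB pre x 0 (pre.length : Int)) x))
      ((0 : Int), ([] : List Int))).2.Perm ((List.range j).map (fun i : Nat => (i : Int) + A.getD i 0))) ∧
    (((PySem.List.pyRange 0 (j : Int) 1).foldl
      (fun (st : Int × List Int) j =>
        let counter := st.1
        let pre := st.2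
        let counter' := counter + ((pre.length : Int) - lbB pre (j - PySem.List.pyGetD A j 0) 0 (pre.length : Int))
        let x := j + PySem.List.pyGetD A j 0
        (counter', PySem.List.insert pre (lbB pre x 0 (pre.length : Int)) x))
      ((0 : Int), ([] : List Int))).1
      = ∑ j' ∈ Finset.range j, ∑ i ∈ Finset.range j', (if pvQ A i j' then (1 : Int) else 0)) := by
  induction j with
  | zero => rw [Nat.cast_zero, PySem.List.pyRange_one_eq_nil le_rfl]; simp
  | succ j ih =>
      obtain ⟨hsort, hperm, hcnt⟩ := ih
      have hr : PySem.List.pyRange 0 ((j + 1 : Nat) : Int) 1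
          = PySem.List.pyRange 0 ((j : Nat) : Int) 1 ++ [((j : Nat) : Int)] := by
        push_cast
        exact PySem.List.pyRange_one_succ_right (by positivity)
      rw [hr, List.foldl_append, List.foldl_cons, List.foldl_nil]
      set st := ((PySem.List.pyRange 0 ((j : Nat) : Int) 1).foldl
        (fun (st : Int × List Int) j =>
          let counter := st.1
          let pre := st.2
          let counter' := counter + ((pre.length : Int) - lbB pre (j - PySem.List.pyGetD A j 0) 0 (pre.length : Int))
          let x := j + PySem.List.pyGetD A j 0
          (counter', PySem.List.insert pre (lbB pre x 0 (pre.length : Int)) x))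
        ((0 : Int), ([] : List Int))) with hst
      dsimp only
      have hget : PySem.List.pyGetD A ((j : Nat) : Int) 0 = A.getD j 0 := PySem.List.pyGetD_natCast A j 0
      set y := ((j : Nat) : Int) - A.getD j 0 with hy
      set x := ((j : Nat) : Int) + A.getD j 0 with hx
      have hlb1 : lbB st.2 y 0 (st.2.length : Int) = (st.2.countP (fun v => decide (v < y)) : Int) :=
        lbB_full st.2 y hsort
      have hlb2 : lbB st.2 x 0 (st.2.length : Int) = (st.2.countP (fun v => decide (v < x)) : Int) :=
        lbB_full st.2 x hsort
      have hxmap : (List.range (j + 1)).map (fun i : Nat => (i : Int) + A.getD i 0)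
          = (List.range j).map (fun i : Nat => (i : Int) + A.getD i 0) ++ [x] := by
        rw [List.range_succ, List.map_append]; rfl
      refine ⟨?_, ?_, ?_⟩
      · -- sortedness of the new prefix
        simp only [hget, ← hx, hlb2]
        rw [PySem.List.insert_natCast st.2 _ _ List.countP_le_length]
        exact sorted_insert_at_countP st.2 x hsort
      · -- permutation of the new prefix
        simp only [hget, ← hx, hlb2]
        rw [PySem.List.insert_natCast st.2 _ _ List.countP_le_length]
        rw [hxmap]
        refine List.Perm.trans ?_ ((hperm.cons x).trans (List.perm_append_singleton x _).symm)
        · have := List.perm_middle (a := x)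
            (l₁ := List.take (st.2.countP (fun v => decide (v < x))) st.2)
            (l₂ := List.drop (st.2.countP (fun v => decide (v < x))) st.2)
          rwa [List.take_append_drop] at this
        
      · -- counter
        simp only [hget, ← hy, hlb1, hcnt]
        rw [Finset.sum_range_succ]
        congr 1
        have hlenE := List.length_eq_countP_add_countP (p := fun v => decide (v < y)) (l := st.2)
        simp only [decide_eq_true_eq] at hlenE
        have hcnot : (st.2.countP (fun v => decide (¬ v < y)) : Int)
            = ∑ i ∈ Finset.range j, (if pvQ A i j then (1 : Int) else 0) := by
          rw [hperm.countP_eq, List.countP_map, countP_range_sum]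
          refine Finset.sum_congr rfl (fun i _ => ?_)
          simp only [Function.comp, pvQ, decide_eq_true_eq]
          by_cases h : ((j : Int) - A.getD j 0 ≤ (i : Int) + A.getD i 0)
          · rw [if_pos (by simpa using (by omega : ¬ ((i : Int) + A.getD i 0 < y))), if_pos h]
          · rw [if_neg (by simpa using (by omega : ¬ ¬ ((i : Int) + A.getD i 0 < y))), if_neg h]
        rw [← hcnot]
        omega
      

lemma solution_a_alt_char (A : List Int) :
    solution_a_alt A = ∑ j ∈ Finset.range A.length, ∑ i ∈ Finset.range A.length, pvG A i j := by
  unfold solution_a_alt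
  rw [(alt_inv A A.length).2.2]
  refine Finset.sum_congr rfl (fun j' hj' => ?_)
  rw [Finset.mem_range] at hj'
  have congr1 : ∀ i ∈ Finset.range j', (if pvQ A i j' then (1 : Int) else 0) = pvG A i j' := by
    intro i hi
    rw [Finset.mem_range] at hi
    simp [pvG, hi]
  rw [Finset.sum_congr rfl congr1]
  refine Finset.sum_subset (fun i hi => ?_) (fun i hi hni => ?_)
  · rw [Finset.mem_range] at hi ⊢; omega
  · rw [Finset.mem_range] at hni
    simp [pvG, hni]

-- ===== VERDICT (by name: the statement is the Claim_ definition above) =====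
theorem solution_a_spec : Claim_equal_solution_a := by
  intro A _
  unfold Spec_solution_a
  rw [solution_a_char, solution_a_alt_char, Finset.sum_comm]
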